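-- pv_equiv track=rewrite | github.com/tokosel/projetsPythonMasterSID | arithmanceur.py | get_number
-- ===== SOURCE A (Python) =====
-- def get_number(name):
--     # Dictionnaire assignant un nombre à chaque lettre de l'alphabet
--     code = {"A": 1, "B": 2, "C": 3, "D": 4, "E": 5, "F": 6, "G": 7, "H": 8,
--             "I": 9, "J": 1, "K": 2, "L": 3, "M": 4, "N": 5, "O": 6, "P": 7,
--             "Q": 8, "R": 9, "S": 1, "T": 2, "U": 3, "V": 4, "W": 5, "X": 6,
--             "Y": 7, "Z": 8}
--
--     # Définition des voyelles et consonnes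
--     voyelles = "AEIOU"
--     consonnes = "BCDFGHJKLMNPQRSTVWXZ"
--
--     # Initialisation des variables pour l'expression, l'intime et la réalisation
--     expression = 0
--     intime = 0
--     realisation = 0
--
--     # Parcours de chaque lettre du nom en majuscules
--     for letter in name.upper():
--         if letter in code:  # Vérification si la lettre est dans le dictionnaire
--             num = code[letter]  # Récupération du nombre associé à la lettre
--             expression += num  # Ajout du nombre à l'expression totale
--             if letter in voyelles:  # Vérification si la lettre est une voyelle
--                 intime += num  # Ajout du nombre à l'intime
--             elif letter in consonnes:  # Vérification si la lettre est une consonne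
--                 realisation += num  # Ajout du nombre à la réalisation
--
--     # Réduction des nombres à un chiffre en ajoutant les chiffres ensemble
--     while expression >= 10:
--         expression = sum(int(d) for d in str(expression))
--
--     while intime >= 10:
--         intime = sum(int(d) for d in str(intime))
--
--     while realisation >= 10:
--         realisation = sum(int(d) for d in str(realisation))
--
--     return expression, intime, realisation  # Retourne les valeurs d'expression, d'intime et de réalisation
-- ===== SOURCE B (Python) =====
-- def get_number(name):
--     # Same numerology sums, but the per-letter code is computed arithmetically
--     # and the digit-reduction while-loops are replaced by the closed-form digital root.
--     def dr(n):
--         return 0 if n == 0 else 1 + (n - 1) % 9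
--
--     expression = intime = realisation = 0
--     for ch in name.upper():
--         if 'A' <= ch <= 'Z':
--             num = (ord(ch) - 65) % 9 + 1
--             expression += num
--             if ch in "AEIOU":
--                 intime += num
--             elif ch != 'Y':
--                 realisation += num
--     return dr(expression), dr(intime), dr(realisation)
-- ===== Notes on version B (the rewrite author's own statement) =====
-- stated objective: simpler
-- what changed: The letter table is replaced by the arithmetic code (ord(c)-65)%9+1 and each of the three digit-sum while-loops by the closed-form digital root 1+(n-1)%9.
import Mathlib
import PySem

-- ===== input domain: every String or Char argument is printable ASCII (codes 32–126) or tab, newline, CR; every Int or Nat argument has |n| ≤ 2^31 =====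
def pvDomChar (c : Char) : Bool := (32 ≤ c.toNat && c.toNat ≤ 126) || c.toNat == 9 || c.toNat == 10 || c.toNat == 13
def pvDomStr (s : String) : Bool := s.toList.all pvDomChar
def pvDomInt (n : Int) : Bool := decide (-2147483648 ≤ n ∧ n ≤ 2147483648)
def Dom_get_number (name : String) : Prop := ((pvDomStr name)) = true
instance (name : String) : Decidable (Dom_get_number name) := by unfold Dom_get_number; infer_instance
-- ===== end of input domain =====

-- B replaces A's letter table by the arithmetic code (ord(c)-65)%9+1 and each digit-sum
-- while-loop by the closed-form digital root 1+(n-1)%9 (objective: simpler; same cost).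


-- ===== PORT A =====
-- int(d) for one character d of str(e); exact on digit characters, the only ones reached
-- (the loop body runs only for e >= 10, so str(e) consists of digits and int never raises).
def pvIntOfDigitChar (c : Char) : Int := (PySem.Int.ofStr? (String.ofList [c])).getD 0

-- sum(int(d) for d in str(e))
def pvDigitSum (e : Int) : Int :=
  (PySem.Int.toStr e).toList.foldl (fun a c => a + pvIntOfDigitChar c) 0

-- The next four lemmas exist only to justify termination of the while-loop pvReduce below.
theorem pvToDigitsCore_eq (f : ℕ) : ∀ (n : ℕ) (acc : List Char), 0 < n → n < f →
    Nat.toDigitsCore 10 f n acc = ((Nat.digits 10 n).map Nat.digitChar).reverse ++ acc := by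
  induction f with
  | zero => intro n acc h0 hf; omega
  | succ f ih =>
    intro n acc h0 hf
    simp only [Nat.toDigitsCore]
    by_cases h : n / 10 = 0
    · have hn : n < 10 := by omega
      rw [if_pos h, Nat.digits_def' (by norm_num) h0, h]
      simp [Nat.mod_eq_of_lt hn]
    · rw [if_neg h, ih (n / 10) _ (Nat.pos_of_ne_zero h) (by omega),
        Nat.digits_def' (by norm_num) h0]
      simp

theorem pvCharVal (d : ℕ) (hd : d < 10) : pvIntOfDigitChar (Nat.digitChar d) = (d : Int) := by
  interval_cases d <;> decide

theorem pvFoldl_digitChars (l : List ℕ) : ∀ (a : Int), (∀ d ∈ l, d < 10) →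
    (l.map Nat.digitChar).foldl (fun a c => a + pvIntOfDigitChar c) a = a + (l.sum : Int) := by
  induction l with
  | nil => intro a _; simp
  | cons x xs ih =>
    intro a h
    simp only [List.map_cons, List.foldl_cons, List.sum_cons]
    rw [pvCharVal x (h x (by simp)), ih _ (fun d hd => h d (by simp [hd]))]
    push_cast; ring

theorem pvDigitSum_eq (e : Int) (h : 10 ≤ e) :
    pvDigitSum e = ((Nat.digits 10 e.toNat).sum : Int) := by
  unfold pvDigitSum
  rw [PySem.Int.toList_toStr]
  unfold PySem.Int.toChars
  rw [if_neg (by omega)]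
  unfold Nat.toDigits
  rw [pvToDigitsCore_eq _ _ _ (by omega) (by omega), List.append_nil, ← List.map_reverse,
    pvFoldl_digitChars _ _ (fun d hd => Nat.digits_lt_base (by norm_num) (List.mem_reverse.mp hd))]
  simp

theorem pvDigitSum_toNat_lt (e : Int) (h : 10 ≤ e) : (pvDigitSum e).toNat < e.toNat := by
  rw [pvDigitSum_eq e h]
  have h10 : 10 ≤ e.toNat := by omega
  have hlt : (Nat.digits 10 e.toNat).sum < e.toNat := by
    rw [Nat.digits_def' (by norm_num) (by omega), List.sum_cons]
    have h1 := Nat.digit_sum_le 10 (e.toNat / 10)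
    omega
  omega

-- while e >= 10: e = sum(int(d) for d in str(e))
def pvReduce (e : Int) : Int :=
  if h : 10 ≤ e then pvReduce (pvDigitSum e) else e
termination_by e.toNat
decreasing_by exact pvDigitSum_toNat_lt e h

-- the literal letter table of A
def pvCode : PySem.Dict Char Int := PySem.Dict.ofList
  [('A', 1), ('B', 2), ('C', 3), ('D', 4), ('E', 5), ('F', 6), ('G', 7), ('H', 8), ('I', 9),
   ('J', 1), ('K', 2), ('L', 3), ('M', 4), ('N', 5), ('O', 6), ('P', 7), ('Q', 8), ('R', 9),
   ('S', 1), ('T', 2), ('U', 3), ('V', 4), ('W', 5), ('X', 6), ('Y', 7), ('Z', 8)]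

-- one iteration of A's for-loop ('letter in voyelles' on a 1-char letter is char membership)
def pvStepA (st : Int × Int × Int) (letter : Char) : Int × Int × Int :=
  match pvCode.get? letter with
  | some num =>
    let expression := st.1 + num
    if letter ∈ "AEIOU".toList then (expression, st.2.1 + num, st.2.2)
    else if letter ∈ "BCDFGHJKLMNPQRSTVWXZ".toList then (expression, st.2.1, st.2.2 + num)
    else (expression, st.2.1, st.2.2)
  | none => st

def get_number (name : String) : Int × Int × Int :=
  let acc := (PySem.Str.upper name).toList.foldl pvStepA (0, 0, 0)
  (pvReduce acc.1, pvReduce acc.2.1, pvReduce acc.2.2)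

-- ===== PORT B =====
-- dr(n) = 0 if n == 0 else 1 + (n - 1) % 9
def pvDr (n : Int) : Int := if n = 0 then 0 else 1 + PySem.Int.mod (n - 1) 9

-- one iteration of B's for-loop
def pvStepB (st : Int × Int × Int) (ch : Char) : Int × Int × Int :=
  if 'A' ≤ ch ∧ ch ≤ 'Z' then
    let num := PySem.Int.mod ((ch.toNat : Int) - 65) 9 + 1
    if ch ∈ "AEIOU".toList then (st.1 + num, st.2.1 + num, st.2.2)
    else if ch ≠ 'Y' then (st.1 + num, st.2.1, st.2.2 + num)
    else (st.1 + num, st.2.1, st.2.2)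
  else st

def get_number_alt (name : String) : Int × Int × Int :=
  let acc := (PySem.Str.upper name).toList.foldl pvStepB (0, 0, 0)
  (pvDr acc.1, pvDr acc.2.1, pvDr acc.2.2)

-- ===== PRECONDITION & SPEC =====
def Spec_get_number (name : String) (out : Int × Int × Int) : Prop := out = get_number_alt name
instance (name : String) (out : Int × Int × Int) : Decidable (Spec_get_number name out) := by unfold Spec_get_number; infer_instance

-- ===== CLAIM (what is proved, stated in full; the proofs are below) =====
def Claim_equal_get_number : Prop := ∀ (name : String), Dom_get_number name → Spec_get_number name (get_number name)

-- ===== LEMMAS AND PROOFS =====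

theorem pvChar_le_iff (a b : Char) : a ≤ b ↔ a.toNat ≤ b.toNat := by
  rw [Char.le_def, UInt32.le_iff_toNat_le]; exact Iff.rfl

theorem pvSumDigits_pos (n : ℕ) (h : 0 < n) : 0 < (Nat.digits 10 n).sum := by
  induction n using Nat.strong_induction_on with
  | _ n ih =>
    rw [Nat.digits_def' (by norm_num) h, List.sum_cons]
    by_cases hm : n % 10 = 0
    · have hd : 0 < n / 10 := by omega
      have := ih (n / 10) (by omega) hd
      omega
    · omega

theorem pvReduce_eq_dr (e : Int) : 0 ≤ e → pvReduce e = pvDr e := by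
  induction e using pvReduce.induct with
  | case1 e h ih =>
    intro he
    rw [pvReduce, dif_pos h]
    have hsum : pvDigitSum e = ((Nat.digits 10 e.toNat).sum : Int) := pvDigitSum_eq e h
    rw [ih (by rw [hsum]; positivity)]
    have hpos : 0 < (Nat.digits 10 e.toNat).sum := pvSumDigits_pos _ (by omega)
    have hmod : e.toNat % 9 = (Nat.digits 10 e.toNat).sum % 9 :=
      Nat.modEq_nine_digits_sum e.toNat
    unfold pvDr
    rw [if_neg (by rw [hsum]; omega), if_neg (by omega),
      PySem.Int.mod_eq_emod_of_pos (by norm_num), PySem.Int.mod_eq_emod_of_pos (by norm_num),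
      hsum]
    have h1 : ((e.toNat : Int)) % 9 = (((Nat.digits 10 e.toNat).sum : Int)) % 9 := by
      exact_mod_cast hmod
    omega
  | case2 e h =>
    intro he
    rw [pvReduce, dif_neg h]
    unfold pvDr
    by_cases h0 : e = 0
    · rw [if_pos h0, h0]
    · rw [if_neg h0, PySem.Int.mod_eq_emod_of_pos (by norm_num)]
      omega

theorem pvKeyNe {c : Char} (h : ¬(65 ≤ c.toNat ∧ c.toNat ≤ 90)) (d : Char)
    (h1 : 65 ≤ d.toNat) (h2 : d.toNat ≤ 90) : (d == c) = false :=
  beq_eq_false_iff_ne.mpr (fun he => h (by rw [← he]; exact ⟨h1, h2⟩))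

theorem pvTable : ∀ k, k < 26 →
    (pvCode.get? (Char.ofNat (65 + k)) =
        some (PySem.Int.mod (((Char.ofNat (65 + k)).toNat : Int) - 65) 9 + 1)) ∧
    ('A' ≤ Char.ofNat (65 + k) ∧ Char.ofNat (65 + k) ≤ 'Z') ∧
    (Char.ofNat (65 + k) ∈ "AEIOU".toList ∨
      (Char.ofNat (65 + k) ∈ "BCDFGHJKLMNPQRSTVWXZ".toList ↔ Char.ofNat (65 + k) ≠ 'Y')) := by
  decide

theorem pvStep_eq (st : Int × Int × Int) (c : Char) : pvStepA st c = pvStepB st c := by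
  by_cases h : 65 ≤ c.toNat ∧ c.toNat ≤ 90
  · have hk : c = Char.ofNat (65 + (c.toNat - 65)) := by
      rw [show 65 + (c.toNat - 65) = c.toNat by omega, Char.ofNat_toNat]
    obtain ⟨hget, hAZ, hclass⟩ := pvTable (c.toNat - 65) (by omega)
    rw [← hk] at hget hAZ hclass
    simp only [pvStepA, pvStepB, hget, if_pos hAZ]
    by_cases hv : c ∈ "AEIOU".toList
    · simp only [if_pos hv]
    · rcases hclass with hv' | hiff
      · exact absurd hv' hv
      · simp only [if_neg hv]
        by_cases hY : c = 'Y'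
        · simp only [if_neg (show c ∉ "BCDFGHJKLMNPQRSTVWXZ".toList by rw [hiff]; simp [hY]),
            if_neg (show ¬ c ≠ 'Y' by simp [hY])]
        · simp only [if_pos (hiff.mpr hY), if_pos hY]
  · have hget : pvCode.get? c = none := by
      have hlist : pvCode = PySem.Dict.mk
        [('A', 1), ('B', 2), ('C', 3), ('D', 4), ('E', 5), ('F', 6), ('G', 7), ('H', 8), ('I', 9),
         ('J', 1), ('K', 2), ('L', 3), ('M', 4), ('N', 5), ('O', 6), ('P', 7), ('Q', 8), ('R', 9),
         ('S', 1), ('T', 2), ('U', 3), ('V', 4), ('W', 5), ('X', 6), ('Y', 7), ('Z', 8)] := by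
        decide
      rw [hlist]
      simp only [PySem.Dict.get?_mk_cons,
        pvKeyNe h 'A' (by decide) (by decide), pvKeyNe h 'B' (by decide) (by decide),
        pvKeyNe h 'C' (by decide) (by decide), pvKeyNe h 'D' (by decide) (by decide),
        pvKeyNe h 'E' (by decide) (by decide), pvKeyNe h 'F' (by decide) (by decide),
        pvKeyNe h 'G' (by decide) (by decide), pvKeyNe h 'H' (by decide) (by decide),
        pvKeyNe h 'I' (by decide) (by decide), pvKeyNe h 'J' (by decide) (by decide),
        pvKeyNe h 'K' (by decide) (by decide), pvKeyNe h 'L' (by decide) (by decide),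
        pvKeyNe h 'M' (by decide) (by decide), pvKeyNe h 'N' (by decide) (by decide),
        pvKeyNe h 'O' (by decide) (by decide), pvKeyNe h 'P' (by decide) (by decide),
        pvKeyNe h 'Q' (by decide) (by decide), pvKeyNe h 'R' (by decide) (by decide),
        pvKeyNe h 'S' (by decide) (by decide), pvKeyNe h 'T' (by decide) (by decide),
        pvKeyNe h 'U' (by decide) (by decide), pvKeyNe h 'V' (by decide) (by decide),
        pvKeyNe h 'W' (by decide) (by decide), pvKeyNe h 'X' (by decide) (by decide),
        pvKeyNe h 'Y' (by decide) (by decide), pvKeyNe h 'Z' (by decide) (by decide)]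
      rfl
    have hb : ¬('A' ≤ c ∧ c ≤ 'Z') := by
      rw [pvChar_le_iff, pvChar_le_iff]
      exact fun hab => h (by exact_mod_cast hab)
    rw [pvStepA, hget, pvStepB, if_neg hb]

theorem pvFoldl_eq (l : List Char) (st : Int × Int × Int) :
    l.foldl pvStepA st = l.foldl pvStepB st := by
  induction l generalizing st with
  | nil => rfl
  | cons x xs ih => rw [List.foldl_cons, List.foldl_cons, pvStep_eq, ih]

theorem pvMod9_nonneg (x : Int) : 0 ≤ PySem.Int.mod x 9 := by
  rw [PySem.Int.mod_eq_emod_of_pos (by norm_num)]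
  exact Int.emod_nonneg x (by norm_num)

theorem pvAcc_nonneg (l : List Char) : ∀ (st : Int × Int × Int),
    0 ≤ st.1 → 0 ≤ st.2.1 → 0 ≤ st.2.2 →
    0 ≤ (l.foldl pvStepB st).1 ∧ 0 ≤ (l.foldl pvStepB st).2.1 ∧ 0 ≤ (l.foldl pvStepB st).2.2 := by
  induction l with
  | nil => intro st h1 h2 h3; exact ⟨h1, h2, h3⟩
  | cons x xs ih =>
    intro st h1 h2 h3
    rw [List.foldl_cons]
    have hm := pvMod9_nonneg ((x.toNat : Int) - 65)
    unfold pvStepB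
    split_ifs <;> exact ih _ (by first | omega | (dsimp only; omega)) (by first | omega | (dsimp only; omega)) (by first | omega | (dsimp only; omega))

-- ===== VERDICT (by name: the statement is the Claim_ definition above) =====
theorem get_number_spec : Claim_equal_get_number := by
  intro name _
  show get_number name = get_number_alt name
  unfold get_number get_number_alt
  rw [pvFoldl_eq]
  obtain ⟨h1, h2, h3⟩ := pvAcc_nonneg (PySem.Str.upper name).toList (0, 0, 0)
    (by norm_num) (by norm_num) (by norm_num)
  simp only [pvReduce_eq_dr _ h1, pvReduce_eq_dr _ h2, pvReduce_eq_dr _ h3]
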